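-- pv_equiv track=rewrite | github.com/lpmwfx/QT-Rules | tools/build-register.py | extract_subtitle
-- ===== SOURCE A (Python) =====
-- def extract_subtitle(lines):
--     """First blockquote after H1."""
--     found_h1 = False
--     parts = []
--     for line in lines:
--         if not found_h1 and line.startswith("# "):
--             found_h1 = True
--             continue
--         if found_h1:
--             if line.startswith("> "):
--                 parts.append(line[2:].strip())
--             elif parts:
--                 break
--             elif line.strip() == "":
--                 continue
--             else:
--                 break
--     return " ".join(parts)
-- ===== SOURCE B (Python) =====
-- def extract_subtitle(lines):
--     """First blockquote after H1."""
--     it = iter(lines)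
--     # phase 1: advance past the first H1 line
--     for line in it:
--         if line.startswith("# "):
--             break
--     else:
--         return ""
--     # phase 2: skip blank lines, stop at the first non-blank line
--     for line in it:
--         if line.strip() != "":
--             first = line
--             break
--     else:
--         return ""
--     if not first.startswith("> "):
--         return ""
--     # phase 3: take the run of blockquote lines
--     parts = [first[2:].strip()]
--     for line in it:
--         if not line.startswith("> "):
--             break
--         parts.append(line[2:].strip())
--     return " ".join(parts)
-- ===== Notes on version B (the rewrite author's own statement) =====
-- stated objective: simpler
-- what changed: Replaced A's single state-machine loop (found_h1 flag + parts-nonempty test deciding continue/break) with three sequential phases over one shared iterator: advance past the first H1 line, skip blank lines to the first non-blank line, then take the run of '> ' lines and join their stripped tails.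
import Mathlib
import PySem

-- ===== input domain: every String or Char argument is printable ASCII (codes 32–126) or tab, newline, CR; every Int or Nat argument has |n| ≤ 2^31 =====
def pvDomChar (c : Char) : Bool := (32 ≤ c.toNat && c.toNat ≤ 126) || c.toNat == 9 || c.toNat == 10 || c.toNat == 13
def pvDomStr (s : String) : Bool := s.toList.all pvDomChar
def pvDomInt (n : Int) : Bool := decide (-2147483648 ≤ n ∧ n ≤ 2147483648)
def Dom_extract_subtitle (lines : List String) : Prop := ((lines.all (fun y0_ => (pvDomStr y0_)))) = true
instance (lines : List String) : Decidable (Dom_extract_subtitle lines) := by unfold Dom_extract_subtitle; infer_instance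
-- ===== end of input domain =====

-- B decomposes the task into three sequential phases over one stream (find H1, skip blanks to
-- the first non-blank line, take the run of '> ' lines) instead of A's single loop driven by a
-- found_h1 flag and a parts-nonempty test; same cost, plainer control flow.

-- ===== PORT A =====
-- A's for-loop with its found_h1 flag, parts accumulator, continue and break, step for step
def pvGoA (found : Bool) (parts : List String) : List String → List String
  | [] => parts
  | l :: rest =>
    if !found && PySem.Str.startswith l "# " then pvGoA true parts rest
    else if found then
      if PySem.Str.startswith l "> " then
        pvGoA found (parts ++ [PySem.Str.strip (PySem.Str.slice l (some 2) none)]) rest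
      else if !parts.isEmpty then parts
      else if PySem.Str.strip l == "" then pvGoA found parts rest
      else parts
    else pvGoA found parts rest

def extract_subtitle (lines : List String) : String :=
  PySem.Str.join " " (pvGoA false [] lines)

-- ===== PORT B =====
-- phase 1: advance past the first line starting with "# " (none = loop exhausted, B returns "")
def pvFindH1 : List String → Option (List String)
  | [] => none
  | l :: rest => if PySem.Str.startswith l "# " then some rest else pvFindH1 rest

-- phase 2: skip blank lines; yield the first non-blank line and the remaining stream
def pvSkipBlank : List String → Option (String × List String)
  | [] => none
  | l :: rest => if PySem.Str.strip l == "" then pvSkipBlank rest else some (l, rest)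

-- line[2:].strip()
def pvPart (l : String) : String := PySem.Str.strip (PySem.Str.slice l (some 2) none)

-- phase 3: take the run of blockquote lines
def pvTakeQ : List String → List String
  | [] => []
  | l :: rest => if PySem.Str.startswith l "> " then pvPart l :: pvTakeQ rest else []

def extract_subtitle_alt (lines : List String) : String :=
  match pvFindH1 lines with
  | none => ""
  | some rest =>
    match pvSkipBlank rest with
    | none => ""
    | some (first, rest2) =>
      if !PySem.Str.startswith first "> " then ""
      else PySem.Str.join " " (pvPart first :: pvTakeQ rest2)

-- ===== PRECONDITION & SPEC =====
def Spec_extract_subtitle (lines : List String) (out : String) : Prop := out = extract_subtitle_alt lines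
instance (lines : List String) (out : String) : Decidable (Spec_extract_subtitle lines out) := by unfold Spec_extract_subtitle; infer_instance

-- ===== CLAIM (what is proved, stated in full; the proofs are below) =====
def Claim_equal_extract_subtitle : Prop := ∀ (lines : List String), Dom_extract_subtitle lines → Spec_extract_subtitle lines (extract_subtitle lines)

-- ===== LEMMAS AND PROOFS =====

-- a line starting with "> " contains the non-space '>' and so does not strip to ""
lemma pv_strip_ne_of_gt (l : String) (h : PySem.Str.startswith l "> " = true) :
    (PySem.Str.strip l == "") = false := by
  rw [beq_eq_false_iff_ne]
  intro hcontra
  have h2 : ['>', ' '] <+: l.toList := by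
    have h' : PySem.Chars.startswith l.toList ['>', ' '] = true := h
    exact (PySem.Chars.startswith_iff l.toList ['>', ' ']).mp h'
  obtain ⟨t, ht⟩ := h2
  have h3 : PySem.Chars.strip l.toList = [] := by
    have := congrArg String.toList hcontra
    simpa [PySem.Str.strip] using this
  rw [← ht] at h3
  have hsp : PySem.Chars.isspace '>' = false := by decide
  simp only [PySem.Chars.strip, PySem.Chars.lstrip, PySem.Chars.rstrip, List.cons_append,
    List.dropWhile_cons, hsp, Bool.false_eq_true, if_false, List.reverse_eq_nil_iff,
    List.dropWhile_eq_nil_iff] at h3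
  have : PySem.Chars.isspace '>' = true := h3 '>' (by simp)
  simp [hsp] at this

-- before H1, A's loop only searches for the "# " line (phase 1 of B)
lemma pv_phase0 (L : List String) :
    pvGoA false [] L = match pvFindH1 L with
      | none => []
      | some r => pvGoA true [] r := by
  induction L with
  | nil => rfl
  | cons l rest ih =>
    simp only [pvGoA, pvFindH1]
    cases h : PySem.Str.startswith l "# " with
    | true => simp
    | false => simpa [h] using ih

-- once parts is nonempty, A's loop is exactly the blockquote run appended (phase 3 of B)
lemma pv_tail : ∀ (L : List String) (p : String) (ps : List String),
    pvGoA true (p :: ps) L = (p :: ps) ++ pvTakeQ L := by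
  intro L
  induction L with
  | nil => intro p ps; simp [pvGoA, pvTakeQ]
  | cons l rest ih =>
    intro p ps
    simp only [pvGoA, pvTakeQ]
    cases h : PySem.Str.startswith l "> " with
    | true =>
      simp only [Bool.not_true, Bool.false_and, Bool.false_eq_true, if_false, if_true,
        List.cons_append]
      rw [ih]
      simp [pvPart]
    | false => simp

-- after H1 with empty parts, A's loop is skip-blanks then the blockquote run (phases 2+3 of B)
lemma pv_first (L : List String) :
    pvGoA true [] L = match pvSkipBlank L with
      | none => []
      | some (f, r) => if PySem.Str.startswith f "> " then pvPart f :: pvTakeQ r else [] := by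
  induction L with
  | nil => rfl
  | cons l rest ih =>
    simp only [pvGoA, pvSkipBlank]
    cases hq : PySem.Str.startswith l "> " with
    | true =>
      have hb := pv_strip_ne_of_gt l hq
      have hq' : PySem.Chars.startswith l.toList ['>', ' '] = true := hq
      simp [hq', hb, pv_tail, pvPart]
    | false =>
      cases hb : (PySem.Str.strip l == "") with
      | true => simpa [hq, hb] using ih
      | false =>
        have hq' : PySem.Chars.startswith l.toList ['>', ' '] = false := hq
        simp [hq', hb]

-- ===== VERDICT (by name: the statement is the Claim_ definition above) =====
theorem extract_subtitle_spec : Claim_equal_extract_subtitle := by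
  intro lines _
  unfold Spec_extract_subtitle extract_subtitle extract_subtitle_alt
  rw [pv_phase0]
  cases hf : pvFindH1 lines with
  | none => rfl
  | some r =>
    simp only
    rw [pv_first]
    cases hs : pvSkipBlank r with
    | none => rfl
    | some fr =>
      obtain ⟨f, r2⟩ := fr
      simp only
      cases hgt : PySem.Str.startswith f "> " with
      | true => simp
      | false => rfl
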